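-- pv_equiv track=rewrite | github.com/pc5401/my_BOJ | 백준/Silver/22811. Get Many Persimmon Trees/Get Many Persimmon Trees.py | solve
-- ===== SOURCE A (Python) =====
-- def solve(n: int, W: int, H: int, trees: list[tuple[int, int]], S: int, T: int) -> int:
--     grid = [[0] * (H + 1) for _ in range(W + 1)]
--     for x, y in trees:
--         grid[x][y] = 1
--
--     ps = [[0] * (H + 1) for _ in range(W + 1)]
--     for i in range(1, W + 1):
--         for j in range(1, H + 1):
--             ps[i][j] = grid[i][j] + ps[i - 1][j] + ps[i][j - 1] - ps[i - 1][j - 1]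
--
--     max_trees = 0
--     for i in range(1, W - S + 2):
--         for j in range(1, H - T + 2):
--             x1, y1 = i, j
--             x2, y2 = i + S - 1, j + T - 1
--             count = ps[x2][y2] - ps[x1 - 1][y2] - ps[x2][y1 - 1] + ps[x1 - 1][y1 - 1]
--             if count > max_trees:
--                 max_trees = count
--     return max_trees
-- ===== SOURCE B (Python) =====
-- def solve(n: int, W: int, H: int, trees: list[tuple[int, int]], S: int, T: int) -> int:
--     grid = [[0] * (H + 1) for _ in range(W + 1)]
--     for x, y in trees:
--         grid[x][y] = 1
--     return max((sum(grid[x][y] for x in range(i, i + S) for y in range(j, j + T))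
--                 for i in range(1, W - S + 2)
--                 for j in range(1, H - T + 2)), default=0)
-- ===== Notes on version B (the rewrite author's own statement) =====
-- stated objective: simpler
-- what changed: Drops the 2D prefix-sum table and the inclusion-exclusion window queries: B builds the same 0/1 grid and takes the max, over all window positions, of a direct sum of the window's cells (max with default 0).
import Mathlib
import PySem

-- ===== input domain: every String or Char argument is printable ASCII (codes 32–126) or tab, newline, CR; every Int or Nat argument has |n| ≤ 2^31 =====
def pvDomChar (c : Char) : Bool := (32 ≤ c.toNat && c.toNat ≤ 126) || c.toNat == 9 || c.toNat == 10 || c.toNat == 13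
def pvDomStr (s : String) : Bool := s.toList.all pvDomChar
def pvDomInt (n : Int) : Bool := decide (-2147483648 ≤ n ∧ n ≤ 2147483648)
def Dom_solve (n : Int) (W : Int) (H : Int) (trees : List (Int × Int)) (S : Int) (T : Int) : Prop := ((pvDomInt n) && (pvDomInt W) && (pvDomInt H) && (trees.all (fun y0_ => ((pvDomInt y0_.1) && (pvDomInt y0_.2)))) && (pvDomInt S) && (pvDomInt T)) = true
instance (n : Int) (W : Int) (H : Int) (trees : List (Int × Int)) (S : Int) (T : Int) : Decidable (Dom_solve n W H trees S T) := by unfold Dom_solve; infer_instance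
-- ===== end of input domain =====

-- B drops A's 2D prefix-sum table and inclusion-exclusion window queries: it builds the same 0/1
-- grid and takes the max over windows of a direct sum of the window's cells (max with default 0).

-- ===== PORT A =====
-- 2-D Python lists are ported with PySem.List.pyGetD / pySetD (Python-exact indexing, including
-- negative-index wraparound; total forms are used only where Pre_solve guarantees Python does not raise).

-- [[0] * (H + 1) for _ in range(W + 1)]
def mk2 (W H : Int) : List (List Int) :=
  List.replicate (W + 1).toNat (List.replicate (H + 1).toNat 0)

-- m[a][b]

-- m[a][b]
def get2 (m : List (List Int)) (a b : Int) : Int :=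
  PySem.List.pyGetD (PySem.List.pyGetD m a []) b 0

-- m[i][j] = v

-- m[i][j] = v
def set2 (m : List (List Int)) (i j v : Int) : List (List Int) :=
  PySem.List.pySetD m i (PySem.List.pySetD (PySem.List.pyGetD m i []) j v)

-- for x, y in trees: grid[x][y] = 1

-- for x, y in trees: grid[x][y] = 1
def gridL (W H : Int) (trees : List (Int × Int)) : List (List Int) :=
  trees.foldl (fun g p => set2 g p.1 p.2 1) (mk2 W H)

-- for i in range(1, W+1): for j in range(1, H+1): ps[i][j] = grid[i][j] + ps[i-1][j] + ps[i][j-1] - ps[i-1][j-1]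

-- for i in range(1, W+1): for j in range(1, H+1): ps[i][j] = grid[i][j] + ps[i-1][j] + ps[i][j-1] - ps[i-1][j-1]
def psL (grid : List (List Int)) (W H : Int) : List (List Int) :=
  (PySem.List.pyRange 1 (W + 1) 1).foldl (fun ps i =>
    (PySem.List.pyRange 1 (H + 1) 1).foldl (fun ps j =>
      set2 ps i j (get2 grid i j + get2 ps (i - 1) j + get2 ps i (j - 1) - get2 ps (i - 1) (j - 1))) ps)
    (mk2 W H)

def solve (n : Int) (W : Int) (H : Int) (trees : List (Int × Int)) (S : Int) (T : Int) : Int :=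
  let grid := gridL W H trees
  let ps := psL grid W H
  (PySem.List.pyRange 1 (W - S + 2) 1).foldl (fun mx i =>
    (PySem.List.pyRange 1 (H - T + 2) 1).foldl (fun mx j =>
      let x1 := i; let y1 := j
      let x2 := i + S - 1; let y2 := j + T - 1
      let count := get2 ps x2 y2 - get2 ps (x1 - 1) y2 - get2 ps x2 (y1 - 1) + get2 ps (x1 - 1) (y1 - 1)
      if count > mx then count else mx) mx) 0

-- ===== PORT B =====
-- max((sum(grid[x][y] for x in range(i, i+S) for y in range(j, j+T)) for i … for j …), default=0)
def solve_alt (n : Int) (W : Int) (H : Int) (trees : List (Int × Int)) (S : Int) (T : Int) : Int :=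
  let grid := trees.foldl (fun g p => set2 g p.1 p.2 1) (mk2 W H)
  let counts := (PySem.List.pyRange 1 (W - S + 2) 1).flatMap (fun i =>
    (PySem.List.pyRange 1 (H - T + 2) 1).map (fun j =>
      ((PySem.List.pyRange i (i + S) 1).map (fun x =>
        ((PySem.List.pyRange j (j + T) 1).map (fun y => get2 grid x y)).sum)).sum))
  (PySem.List.max? counts (fun c => c)).getD 0

-- ===== PRECONDITION & SPEC =====
-- Pre_solve is exactly where Python A returns normally: every tree write lands in the grid
-- (directly or by Python's negative-index wraparound) and the window sizes are nonnegative or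
-- degenerate (W < S or H < T, empty window range); everywhere else A raises IndexError.
def Pre_solve (n : Int) (W : Int) (H : Int) (trees : List (Int × Int)) (S : Int) (T : Int) : Prop :=
  (∀ p ∈ trees, -(W + 1) ≤ p.1 ∧ p.1 ≤ W ∧ -(H + 1) ≤ p.2 ∧ p.2 ≤ H) ∧
    (0 ≤ S ∧ 0 ≤ T ∨ W < S ∨ H < T)
instance (n : Int) (W : Int) (H : Int) (trees : List (Int × Int)) (S : Int) (T : Int) : Decidable (Pre_solve n W H trees S T) := by unfold Pre_solve; infer_instance

def pvWitness_solve : Int × Int × Int × (List (Int × Int)) × Int × Int := (2, 2, 2, [(1, 1), (2, 2)], 1, 1)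

def Spec_solve (n : Int) (W : Int) (H : Int) (trees : List (Int × Int)) (S : Int) (T : Int) (out : Int) : Prop := out = solve_alt n W H trees S T
instance (n : Int) (W : Int) (H : Int) (trees : List (Int × Int)) (S : Int) (T : Int) (out : Int) : Decidable (Spec_solve n W H trees S T out) := by unfold Spec_solve; infer_instance

-- ===== CLAIM (what is proved, stated in full; the proofs are below) =====
def Claim_equal_solve : Prop := ∀ (n : Int) (W : Int) (H : Int) (trees : List (Int × Int)) (S : Int) (T : Int), Dom_solve n W H trees S T → Pre_solve n W H trees S T → Spec_solve n W H trees S T (solve n W H trees S T)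

-- ===== LEMMAS AND PROOFS =====

def Shape (W H : Int) (m : List (List Int)) : Prop :=
  m.length = (W + 1).toNat ∧ ∀ r ∈ m, r.length = (H + 1).toNat

theorem shape_mk2 (W H : Int) : Shape W H (mk2 W H) := by
  constructor
  · simp [mk2]
  · intro r hr
    simp [mk2] at hr
    simp [hr.2]

theorem getD_replicate_zero (n k : Nat) : (List.replicate k (0 : Int)).getD n 0 = 0 := by
  simp only [List.getD, List.getElem?_replicate]
  split <;> rfl

theorem get2_nonneg (m : List (List Int)) (a b : Int) (ha : 0 ≤ a) (hb : 0 ≤ b) :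
    get2 m a b = (m.getD a.toNat []).getD b.toNat 0 := by
  unfold get2
  rw [PySem.List.pyGetD_of_nonneg _ _ ha, PySem.List.pyGetD_of_nonneg _ _ hb]

theorem get2_mk2 (W H a b : Int) (ha : 0 ≤ a) (hb : 0 ≤ b) : get2 (mk2 W H) a b = 0 := by
  rw [get2_nonneg _ _ _ ha hb]
  unfold mk2
  rcases lt_or_ge a.toNat (W + 1).toNat with h | h
  · rw [show (List.replicate (W + 1).toNat (List.replicate (H + 1).toNat (0 : Int))).getD a.toNat []
        = List.replicate (H + 1).toNat 0 from by
      rw [List.getD_eq_getElem _ _ (by simpa using h)]; simp]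
    exact getD_replicate_zero _ _
  · rw [List.getD_eq_default (d := ([] : List Int)) _ (by simpa using h)]
    rfl

theorem set2_eq (m : List (List Int)) (i j v : Int) (hi : 0 ≤ i) (hj : 0 ≤ j) :
    set2 m i j v = m.set i.toNat ((m.getD i.toNat []).set j.toNat v) := by
  unfold set2
  rw [PySem.List.pySetD_of_nonneg _ _ hi, PySem.List.pyGetD_of_nonneg _ _ hi,
      PySem.List.pySetD_of_nonneg _ _ hj]

theorem shape_set2 (W H : Int) (m : List (List Int)) (hs : Shape W H m) (i j v : Int)
    (hi0 : 0 ≤ i) (hiW : i ≤ W) (hj : 0 ≤ j) : Shape W H (set2 m i j v) := by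
  obtain ⟨h1, h2⟩ := hs
  have hbound : i.toNat < m.length := by omega
  rw [set2_eq m i j v hi0 hj]
  refine ⟨by simpa using h1, ?_⟩
  intro r hr
  rcases List.mem_or_eq_of_mem_set hr with h | h
  · exact h2 r h
  · subst h
    rw [List.length_set, List.getD_eq_getElem _ _ hbound]
    exact h2 _ (List.getElem_mem hbound)

theorem get2_set2 (W H : Int) (m : List (List Int)) (hs : Shape W H m) (i j v a b : Int)
    (hi0 : 0 ≤ i) (hiW : i ≤ W) (hj0 : 0 ≤ j) (hjH : j ≤ H)
    (ha0 : 0 ≤ a) (haW : a ≤ W) (hb0 : 0 ≤ b) (hbH : b ≤ H) :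
    get2 (set2 m i j v) a b = if a = i ∧ b = j then v else get2 m a b := by
  obtain ⟨h1, h2⟩ := hs
  have hibound : i.toNat < m.length := by omega
  have habound : a.toNat < m.length := by omega
  have hrow : (m.getD i.toNat []).length = (H + 1).toNat := by
    rw [List.getD_eq_getElem _ _ hibound]
    exact h2 _ (List.getElem_mem hibound)
  rw [set2_eq m i j v hi0 hj0, get2_nonneg _ _ _ ha0 hb0, get2_nonneg _ _ _ ha0 hb0]
  by_cases hai : a = i
  · subst hai
    rw [List.getD_eq_getElem (d := ([] : List Int)) _ (by simpa using habound), List.getElem_set_self (by simpa using habound)]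
    have hrow' : (m.getD a.toNat []).set j.toNat v = (m.getD a.toNat []).set j.toNat v := rfl
    by_cases hbj : b = j
    · subst hbj
      rw [if_pos ⟨rfl, rfl⟩]
      rw [List.getD_eq_getElem?_getD, List.getElem?_set_self (by omega), Option.getD_some]
    · rw [if_neg (by tauto)]
      have hne : b.toNat ≠ j.toNat := by omega
      rw [List.getD_eq_getElem?_getD, List.getElem?_set_ne (Ne.symm hne),
          ← List.getD_eq_getElem?_getD]
  · rw [if_neg (by tauto)]
    have hne : i.toNat ≠ a.toNat := by omega
    rw [List.getD_eq_getElem (d := ([] : List Int)) _ (by simpa using habound),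
        List.getElem_set_ne (h := hne),
        List.getD_eq_getElem (d := ([] : List Int)) _ habound]

def psInner (g : Int → Int → Int) (i : Int) (ps : Int → Int → Int) (j : Int) : Int → Int → Int :=
  let v := g i j + ps (i - 1) j + ps i (j - 1) - ps (i - 1) (j - 1)
  fun a b => if a = i ∧ b = j then v else ps a b

def psA (g : Int → Int → Int) (W H : Int) : Int → Int → Int :=
  (PySem.List.pyRange 1 (W + 1) 1).foldl
    (fun ps i => (PySem.List.pyRange 1 (H + 1) 1).foldl (psInner g i) ps)
    (fun _ _ => 0)

def colSum (g : Int → Int → Int) (x b : Int) : Int :=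
  ((PySem.List.pyRange 1 (b + 1) 1).map (fun y => g x y)).sum

def rectSum (g : Int → Int → Int) (a b : Int) : Int :=
  ((PySem.List.pyRange 1 (a + 1) 1).map (fun x => colSum g x b)).sum

theorem colSum_nonpos (g : Int → Int → Int) (x b : Int) (h : b ≤ 0) : colSum g x b = 0 := by
  unfold colSum
  rw [PySem.List.pyRange_one_eq_nil (by omega)]; simp

theorem rectSum_nonpos_left (g : Int → Int → Int) (a b : Int) (h : a ≤ 0) : rectSum g a b = 0 := by
  unfold rectSum
  rw [PySem.List.pyRange_one_eq_nil (by omega)]; simp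

theorem rectSum_nonpos_right (g : Int → Int → Int) (a b : Int) (h : b ≤ 0) : rectSum g a b = 0 := by
  unfold rectSum
  apply List.sum_eq_zero
  intro x hx
  simp only [List.mem_map] at hx
  obtain ⟨y, -, rfl⟩ := hx
  exact colSum_nonpos g y b h

theorem colSum_succ (g : Int → Int → Int) (x b : Int) (h : 1 ≤ b) :
    colSum g x b = colSum g x (b - 1) + g x b := by
  unfold colSum
  have h1 : PySem.List.pyRange 1 (b + 1) 1 = PySem.List.pyRange 1 b 1 ++ [b] :=
    PySem.List.pyRange_one_succ_right h
  have h2 : PySem.List.pyRange 1 ((b - 1) + 1) 1 = PySem.List.pyRange 1 b 1 := by norm_num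
  rw [h1, h2]; simp

theorem rectSum_row (g : Int → Int → Int) (a b : Int) (h : 1 ≤ a) :
    rectSum g a b = rectSum g (a - 1) b + colSum g a b := by
  unfold rectSum
  have h1 : PySem.List.pyRange 1 (a + 1) 1 = PySem.List.pyRange 1 a 1 ++ [a] :=
    PySem.List.pyRange_one_succ_right h
  have h2 : PySem.List.pyRange 1 ((a - 1) + 1) 1 = PySem.List.pyRange 1 a 1 := by norm_num
  rw [h1, h2]; simp

theorem rect_recur (g : Int → Int → Int) (i j : Int) (hi : 1 ≤ i) (hj : 1 ≤ j) :
    rectSum g i j = g i j + rectSum g (i - 1) j + rectSum g i (j - 1) - rectSum g (i - 1) (j - 1) := by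
  have h1 := rectSum_row g i j hi
  have h2 := rectSum_row g i (j - 1) hi
  have h3 := colSum_succ g i j hj
  linarith

theorem psInner_inv (g : Int → Int → Int) (H i : Int) (hi1 : 1 ≤ i) (n : Nat) :
    ∀ (j0 : Int) (ps : Int → Int → Int), 1 ≤ j0 → H + 1 = j0 + n →
    (∀ a b, ps a b = if (1 ≤ a ∧ a ≤ i - 1 ∧ 1 ≤ b ∧ b ≤ H) ∨ (a = i ∧ 1 ≤ b ∧ b ≤ j0 - 1) then rectSum g a b else 0) →
    ∀ a b, ((PySem.List.pyRange j0 (H + 1) 1).foldl (psInner g i) ps) a b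
      = if (1 ≤ a ∧ a ≤ i - 1 ∧ 1 ≤ b ∧ b ≤ H) ∨ (a = i ∧ 1 ≤ b ∧ b ≤ H) then rectSum g a b else 0 := by
  induction n with
  | zero =>
    intro j0 ps hj0 hn hps a b
    rw [PySem.List.pyRange_one_eq_nil (by omega)]
    simp only [List.foldl_nil]
    rw [hps a b]
    have : ((1 ≤ a ∧ a ≤ i - 1 ∧ 1 ≤ b ∧ b ≤ H) ∨ (a = i ∧ 1 ≤ b ∧ b ≤ j0 - 1)) ↔
           ((1 ≤ a ∧ a ≤ i - 1 ∧ 1 ≤ b ∧ b ≤ H) ∨ (a = i ∧ 1 ≤ b ∧ b ≤ H)) := by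
      constructor <;> (rintro (h | h); exacts [Or.inl h, Or.inr ⟨h.1, h.2.1, by omega⟩])
    rw [if_congr this rfl rfl]
  | succ m ih =>
    intro j0 ps hj0 hn hps a b
    rw [PySem.List.pyRange_one_cons (by omega)]
    simp only [List.foldl_cons]
    apply ih (j0 + 1) _ (by omega) (by omega)
    intro a b
    show (if a = i ∧ b = j0 then _ else ps a b) = _
    have hv : g i j0 + ps (i - 1) j0 + ps i (j0 - 1) - ps (i - 1) (j0 - 1) = rectSum g i j0 := by
      have e1 : ps (i - 1) j0 = rectSum g (i - 1) j0 := by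
        rw [hps]
        by_cases h2 : 2 ≤ i
        · rw [if_pos (Or.inl ⟨by omega, by omega, by omega, by omega⟩)]
        · have : i = 1 := by omega
          subst this
          rw [if_neg (by omega), rectSum_nonpos_left g _ _ (by omega)]
      have e2 : ps i (j0 - 1) = rectSum g i (j0 - 1) := by
        rw [hps]
        by_cases h2 : 2 ≤ j0
        · rw [if_pos (Or.inr ⟨rfl, by omega, by omega⟩)]
        · have : j0 = 1 := by omega
          subst this
          rw [if_neg (by omega), rectSum_nonpos_right g _ _ (by omega)]
      have e3 : ps (i - 1) (j0 - 1) = rectSum g (i - 1) (j0 - 1) := by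
        rw [hps]
        by_cases h2 : (2 ≤ i ∧ 2 ≤ j0)
        · rw [if_pos (Or.inl ⟨by omega, by omega, by omega, by omega⟩)]
        · rw [if_neg (by omega)]
          rcases (by omega : i = 1 ∨ j0 = 1) with h | h <;> rw [h]
          · rw [rectSum_nonpos_left g _ _ (by omega)]
          · rw [rectSum_nonpos_right g _ _ (by omega)]
      rw [e1, e2, e3]
      linarith [rect_recur g i j0 hi1 hj0]
    by_cases hij : a = i ∧ b = j0
    · rw [if_pos hij]
      obtain ⟨rfl, rfl⟩ := hij
      rw [if_pos (Or.inr ⟨rfl, by omega, by omega⟩)]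
      exact hv
    · rw [if_neg hij, hps]
      have : ((1 ≤ a ∧ a ≤ i - 1 ∧ 1 ≤ b ∧ b ≤ H) ∨ (a = i ∧ 1 ≤ b ∧ b ≤ j0 - 1)) ↔
             ((1 ≤ a ∧ a ≤ i - 1 ∧ 1 ≤ b ∧ b ≤ H) ∨ (a = i ∧ 1 ≤ b ∧ b ≤ (j0 + 1) - 1)) := by
        constructor
        · rintro (h | h); exacts [Or.inl h, Or.inr ⟨h.1, h.2.1, by omega⟩]
        · rintro (h | h)
          · exact Or.inl h
          · refine Or.inr ⟨h.1, h.2.1, ?_⟩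
            rcases h with ⟨rfl, hb1, hb2⟩
            by_cases hb : b = j0
            · exact absurd ⟨rfl, hb⟩ hij
            · omega
      rw [if_congr this rfl rfl]

theorem psOuter_inv (g : Int → Int → Int) (W H : Int) (n : Nat) :
    ∀ (k : Int) (ps : Int → Int → Int), 1 ≤ k → W + 1 = k + n →
    (∀ a b, ps a b = if 1 ≤ a ∧ a ≤ k - 1 ∧ 1 ≤ b ∧ b ≤ H then rectSum g a b else 0) →
    ∀ a b, ((PySem.List.pyRange k (W + 1) 1).foldl
        (fun ps i => (PySem.List.pyRange 1 (H + 1) 1).foldl (psInner g i) ps) ps) a b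
      = if 1 ≤ a ∧ a ≤ W ∧ 1 ≤ b ∧ b ≤ H then rectSum g a b else 0 := by
  induction n with
  | zero =>
    intro k ps hk hn hps a b
    rw [show PySem.List.pyRange k (W + 1) 1 = [] from PySem.List.pyRange_one_eq_nil (by omega)]
    simp only [List.foldl_nil]
    rw [hps a b]
    exact if_congr (by omega) rfl rfl
  | succ m ih =>
    intro k ps hk hn hps a b
    rw [show PySem.List.pyRange k (W + 1) 1 = k :: PySem.List.pyRange (k + 1) (W + 1) 1 from PySem.List.pyRange_one_cons (by omega)]
    simp only [List.foldl_cons]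
    apply ih (k + 1) _ (by omega) (by omega)
    intro a b
    have hmid : ∀ a b, ((PySem.List.pyRange 1 (H + 1) 1).foldl (psInner g k) ps) a b
        = if (1 ≤ a ∧ a ≤ k - 1 ∧ 1 ≤ b ∧ b ≤ H) ∨ (a = k ∧ 1 ≤ b ∧ b ≤ H) then rectSum g a b else 0 := by
      by_cases hH : 0 ≤ H
      · apply psInner_inv g H k hk H.toNat 1 ps (by omega) (by omega)
        intro a b
        rw [hps]
        exact if_congr (by omega) rfl rfl
      · rw [show PySem.List.pyRange 1 (H + 1) 1 = [] from PySem.List.pyRange_one_eq_nil (by omega)]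
        intro a b
        simp only [List.foldl_nil]
        rw [hps]
        exact if_congr (by constructor <;> omega) rfl rfl
    rw [hmid a b]
    exact if_congr (by omega) rfl rfl

theorem psA_eq (g : Int → Int → Int) (W H a b : Int)
    (ha0 : 0 ≤ a) (haW : a ≤ W) (hb0 : 0 ≤ b) (hbH : b ≤ H) :
    psA g W H a b = rectSum g a b := by
  have main : ∀ a b, psA g W H a b = if 1 ≤ a ∧ a ≤ W ∧ 1 ≤ b ∧ b ≤ H then rectSum g a b else 0 := by
    apply psOuter_inv g W H W.toNat 1 _ (by omega) (by omega)
    intro a b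
    rw [if_neg (by omega)]
  rw [main a b]
  by_cases h1 : 1 ≤ a
  · by_cases h2 : 1 ≤ b
    · rw [if_pos ⟨h1, haW, h2, hbH⟩]
    · rw [if_neg (by omega), rectSum_nonpos_right g _ _ (by omega)]
  · rw [if_neg (by omega), rectSum_nonpos_left g _ _ (by omega)]

def RepG (W H : Int) (m : List (List Int)) (f : Int → Int → Int) : Prop :=
  Shape W H m ∧ ∀ a b, 0 ≤ a → a ≤ W → 0 ≤ b → b ≤ H → get2 m a b = f a b

theorem fold_sim {σ τ α : Type} (R : σ → τ → Prop) (f : σ → α → σ) (g : τ → α → τ) :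
    ∀ (l : List α), (∀ s t x, x ∈ l → R s t → R (f s x) (g t x)) →
    ∀ s t, R s t → R (l.foldl f s) (l.foldl g t) := by
  intro l
  induction l with
  | nil => intro _ s t hst; simpa
  | cons x xs ih =>
    intro h s t hst
    simp only [List.foldl_cons]
    exact ih (fun s t y hy => h s t y (List.mem_cons_of_mem _ hy)) _ _
      (h s t x List.mem_cons_self hst)

theorem rep_mk2 (W H : Int) : RepG W H (mk2 W H) (fun _ _ => 0) := by
  refine ⟨shape_mk2 W H, ?_⟩
  intro a b ha _ hb _
  exact get2_mk2 W H a b ha hb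

theorem ps_sim (W H : Int) (gl : List (List Int)) (gf : Int → Int → Int)
    (hg : ∀ a b, 0 ≤ a → a ≤ W → 0 ≤ b → b ≤ H → get2 gl a b = gf a b) :
    RepG W H (psL gl W H) (psA gf W H) := by
  unfold psL psA
  apply fold_sim (RepG W H) _ _ _ _ _ _ (rep_mk2 W H)
  intro s t i hi hst
  rw [PySem.List.mem_pyRange_one] at hi
  apply fold_sim (RepG W H) _ _ _ _ _ _ hst
  intro s t j hj ⟨hs, hget⟩
  rw [PySem.List.mem_pyRange_one] at hj
  have hv : get2 gl i j + get2 s (i - 1) j + get2 s i (j - 1) - get2 s (i - 1) (j - 1)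
      = gf i j + t (i - 1) j + t i (j - 1) - t (i - 1) (j - 1) := by
    rw [hg i j (by omega) (by omega) (by omega) (by omega),
        hget (i - 1) j (by omega) (by omega) (by omega) (by omega),
        hget i (j - 1) (by omega) (by omega) (by omega) (by omega),
        hget (i - 1) (j - 1) (by omega) (by omega) (by omega) (by omega)]
  refine ⟨shape_set2 W H s hs i j _ (by omega) (by omega) (by omega), ?_⟩
  intro a b ha0 haW hb0 hbH
  rw [get2_set2 W H s hs i j _ a b (by omega) (by omega) (by omega) (by omega) ha0 haW hb0 hbH]
  unfold psInner
  by_cases h : a = i ∧ b = j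
  · simp [h, hv]
  · simp [h, hget a b ha0 haW hb0 hbH]

def bandSum (g : Int → Int → Int) (i j S T : Int) : Int :=
  ((PySem.List.pyRange i (i + S) 1).map (fun x => ((PySem.List.pyRange j (j + T) 1).map (fun y => g x y)).sum)).sum

theorem sum_map_sub {α : Type} (l : List α) (f g : α → Int) :
    (l.map f).sum - (l.map g).sum = (l.map (fun x => f x - g x)).sum := by
  induction l with
  | nil => simp
  | cons x t ih => simp only [List.map_cons, List.sum_cons]; omega

theorem rect_diff (g : Int → Int → Int) (a b c : Int) (h0 : 0 ≤ c) (hca : c ≤ a) :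
    rectSum g a b - rectSum g c b = ((PySem.List.pyRange (c + 1) (a + 1) 1).map (fun x => colSum g x b)).sum := by
  unfold rectSum
  rw [PySem.List.pyRange_one_append 1 (c + 1) (a + 1) (by omega) (by omega)]
  simp

theorem col_diff (g : Int → Int → Int) (x b c : Int) (h0 : 0 ≤ c) (hca : c ≤ b) :
    colSum g x b - colSum g x c = ((PySem.List.pyRange (c + 1) (b + 1) 1).map (fun y => g x y)).sum := by
  unfold colSum
  rw [PySem.List.pyRange_one_append 1 (c + 1) (b + 1) (by omega) (by omega)]
  simp

theorem cnt_eq (g : Int → Int → Int) (W H S T i j : Int) (hS : 0 ≤ S) (hT : 0 ≤ T)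
    (hi1 : 1 ≤ i) (hiW : i ≤ W - S + 1) (hj1 : 1 ≤ j) (hjH : j ≤ H - T + 1) :
    psA g W H (i + S - 1) (j + T - 1) - psA g W H (i - 1) (j + T - 1)
      - psA g W H (i + S - 1) (j - 1) + psA g W H (i - 1) (j - 1) = bandSum g i j S T := by
  rw [psA_eq g W H _ _ (by omega) (by omega) (by omega) (by omega),
      psA_eq g W H _ _ (by omega) (by omega) (by omega) (by omega),
      psA_eq g W H _ _ (by omega) (by omega) (by omega) (by omega),
      psA_eq g W H _ _ (by omega) (by omega) (by omega) (by omega)]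
  have key : ∀ b : Int, rectSum g (i + S - 1) b - rectSum g (i - 1) b
      = ((PySem.List.pyRange i (i + S) 1).map (fun x => colSum g x b)).sum := by
    intro b
    have := rect_diff g (i + S - 1) b (i - 1) (by omega) (by omega)
    rw [show (i - 1) + 1 = i by ring, show (i + S - 1) + 1 = i + S by ring] at this
    exact this
  have expand : rectSum g (i + S - 1) (j + T - 1) - rectSum g (i - 1) (j + T - 1)
      - (rectSum g (i + S - 1) (j - 1) - rectSum g (i - 1) (j - 1))
      = ((PySem.List.pyRange i (i + S) 1).map (fun x => colSum g x (j + T - 1))).sum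
        - ((PySem.List.pyRange i (i + S) 1).map (fun x => colSum g x (j - 1))).sum := by
    rw [key, key]
  have expand2 : ((PySem.List.pyRange i (i + S) 1).map (fun x => colSum g x (j + T - 1))).sum
        - ((PySem.List.pyRange i (i + S) 1).map (fun x => colSum g x (j - 1))).sum
      = bandSum g i j S T := by
    rw [sum_map_sub]
    unfold bandSum
    apply congrArg
    apply List.map_congr_left
    intro x _
    have := col_diff g x (j + T - 1) (j - 1) (by omega) (by omega)
    rw [show (j - 1) + 1 = j by ring, show (j + T - 1) + 1 = j + T by ring] at this
    exact this
  omega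

theorem mem_pySetD {α : Type} (xs : List α) (i : Int) (v : α) (y : α)
    (hy : y ∈ PySem.List.pySetD xs i v) : y = v ∨ y ∈ xs := by
  unfold PySem.List.pySetD PySem.List.pySet? at hy
  rcases h : PySem.List.pyIdx? xs.length i with _ | k
  · rw [h] at hy; right; simpa using hy
  · rw [h] at hy
    simp only [Option.map_some, Option.getD_some] at hy
    rcases List.mem_or_eq_of_mem_set hy with h2 | h2
    · right; exact h2
    · left; exact h2

theorem entries_nonneg_set2 (m : List (List Int)) (i j : Int)
    (hm : ∀ r ∈ m, ∀ c ∈ r, 0 ≤ c) :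
    ∀ r ∈ set2 m i j 1, ∀ c ∈ r, 0 ≤ c := by
  intro r hr c hc
  rcases mem_pySetD m i _ r hr with h | h
  · subst h
    rcases mem_pySetD _ j 1 c hc with h2 | h2
    · omega
    · -- c ∈ pyGetD m i [] : that row is a member of m or the default []
      unfold PySem.List.pyGetD PySem.List.pyGet? at h2
      rcases h3 : (PySem.List.pyIdx? m.length i).bind (fun k => m[k]?) with _ | row
      · rw [h3] at h2; simp at h2
      · rw [h3] at h2
        simp only [Option.getD_some] at h2
        rcases h4 : PySem.List.pyIdx? m.length i with _ | k
        · rw [h4] at h3; simp at h3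
        · rw [h4] at h3
          simp only [Option.bind_some] at h3
          exact hm row (List.mem_of_getElem? h3) c h2
  · exact hm r h c hc

theorem entries_nonneg_grid (W H : Int) (trees : List (Int × Int)) :
    ∀ r ∈ trees.foldl (fun g p => set2 g p.1 p.2 1) (mk2 W H), ∀ c ∈ r, 0 ≤ c := by
  have base : ∀ r ∈ mk2 W H, ∀ c ∈ r, 0 ≤ c := by
    intro r hr c hc
    have := List.eq_of_mem_replicate hr
    subst this
    have := List.eq_of_mem_replicate hc
    omega
  have gen : ∀ (l : List (Int × Int)) (m : List (List Int)),
      (∀ r ∈ m, ∀ c ∈ r, 0 ≤ c) →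
      ∀ r ∈ l.foldl (fun g p => set2 g p.1 p.2 1) m, ∀ c ∈ r, 0 ≤ c := by
    intro l
    induction l with
    | nil => intro m hm; simpa using hm
    | cons p t ih =>
      intro m hm
      simp only [List.foldl_cons]
      exact ih _ (entries_nonneg_set2 m p.1 p.2 hm)
  exact gen trees (mk2 W H) base

theorem get2_nonneg_of_entries (m : List (List Int)) (hm : ∀ r ∈ m, ∀ c ∈ r, 0 ≤ c)
    (a b : Int) (ha : 0 ≤ a) (hb : 0 ≤ b) : 0 ≤ get2 m a b := by
  unfold get2
  rw [PySem.List.pyGetD_of_nonneg _ _ ha, PySem.List.pyGetD_of_nonneg _ _ hb]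
  rcases lt_or_ge a.toNat m.length with h | h
  · rw [List.getD_eq_getElem (d := ([] : List Int)) _ h]
    rcases lt_or_ge b.toNat (m[a.toNat]).length with h2 | h2
    · rw [List.getD_eq_getElem _ _ h2]
      exact hm _ (List.getElem_mem h) _ (List.getElem_mem h2)
    · rw [List.getD_eq_default _ _ h2]
  · rw [List.getD_eq_default (d := ([] : List Int)) _ h]
    simp [List.getD]

theorem bandSum_nonneg (m : List (List Int)) (hm : ∀ r ∈ m, ∀ c ∈ r, 0 ≤ c)
    (i j S T : Int) (hi : 1 ≤ i) (hj : 1 ≤ j) :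
    0 ≤ bandSum (fun a b => get2 m a b) i j S T := by
  apply List.sum_nonneg
  intro s hs
  simp only [List.mem_map] at hs
  obtain ⟨x, hx, rfl⟩ := hs
  rw [PySem.List.mem_pyRange_one] at hx
  apply List.sum_nonneg
  intro c hc
  simp only [List.mem_map] at hc
  obtain ⟨y, hy, rfl⟩ := hc
  rw [PySem.List.mem_pyRange_one] at hy
  exact get2_nonneg_of_entries m hm x y (by omega) (by omega)

theorem foldl_max_max (t : List Int) (a b : Int) :
    t.foldl max (max a b) = max a (t.foldl max b) := by
  induction t generalizing b with
  | nil => simp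
  | cons x t ih =>
    simp only [List.foldl_cons]
    rw [max_assoc, ih]

theorem nested_fold_eq (l1 l2 : List Int) (f : Int → Int → Int) (m0 : Int) :
    l1.foldl (fun mx i => l2.foldl (fun mx j => if f i j > mx then f i j else mx) mx) m0
      = (l1.flatMap (fun i => l2.map (f i))).foldl max m0 := by
  induction l1 generalizing m0 with
  | nil => simp
  | cons x t ih =>
    simp only [List.foldl_cons, List.flatMap_cons, List.foldl_append, ih]
    have hfun : (fun (mx j : Int) => if f x j > mx then f x j else mx)
        = (fun (mx j : Int) => max mx (f x j)) := by
      funext mx j; split_ifs with h <;> omega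
    rw [hfun, List.foldl_map]

theorem fold_max_eq_maxD (l : List Int) (h : ∀ c ∈ l, 0 ≤ c) :
    l.foldl max 0 = (PySem.List.max? l (fun c => c)).getD 0 := by
  cases l with
  | nil => rw [(PySem.List.max?_eq_none_iff [] (fun c => c)).mpr rfl]; rfl
  | cons c t =>
    rw [PySem.List.max?_id_cons, Option.getD_some, List.foldl_cons, foldl_max_max]
    have hc : 0 ≤ c := h c List.mem_cons_self
    exact max_eq_right (le_trans hc (PySem.List.le_foldl_max t c).1)

theorem solve_eq_fold (n W H : Int) (trees : List (Int × Int)) (S T : Int) :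
    solve n W H trees S T
      = ((PySem.List.pyRange 1 (W - S + 2) 1).flatMap (fun i =>
          (PySem.List.pyRange 1 (H - T + 2) 1).map (fun j =>
            get2 (psL (gridL W H trees) W H) (i + S - 1) (j + T - 1)
              - get2 (psL (gridL W H trees) W H) (i - 1) (j + T - 1)
              - get2 (psL (gridL W H trees) W H) (i + S - 1) (j - 1)
              + get2 (psL (gridL W H trees) W H) (i - 1) (j - 1)))).foldl max 0 := by
  unfold solve
  exact nested_fold_eq _ _ _ 0

theorem solve_main (n W H : Int) (trees : List (Int × Int)) (S T : Int)
    (hS : 0 ≤ S) (hT : 0 ≤ T) :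
    solve n W H trees S T = solve_alt n W H trees S T := by
  obtain ⟨-, hpget⟩ := ps_sim W H (gridL W H trees) (fun a b => get2 (gridL W H trees) a b)
    (fun a b _ _ _ _ => rfl)
  rw [solve_eq_fold]
  unfold solve_alt
  have hlists : (PySem.List.pyRange 1 (W - S + 2) 1).flatMap (fun i =>
          (PySem.List.pyRange 1 (H - T + 2) 1).map (fun j =>
            get2 (psL (gridL W H trees) W H) (i + S - 1) (j + T - 1)
              - get2 (psL (gridL W H trees) W H) (i - 1) (j + T - 1)
              - get2 (psL (gridL W H trees) W H) (i + S - 1) (j - 1)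
              + get2 (psL (gridL W H trees) W H) (i - 1) (j - 1)))
      = (PySem.List.pyRange 1 (W - S + 2) 1).flatMap (fun i =>
          (PySem.List.pyRange 1 (H - T + 2) 1).map (fun j =>
            ((PySem.List.pyRange i (i + S) 1).map (fun x =>
              ((PySem.List.pyRange j (j + T) 1).map (fun y =>
                get2 (trees.foldl (fun g p => set2 g p.1 p.2 1) (mk2 W H)) x y)).sum)).sum)) := by
    have hmaps : (PySem.List.pyRange 1 (W - S + 2) 1).map (fun i =>
          (PySem.List.pyRange 1 (H - T + 2) 1).map (fun j =>
            get2 (psL (gridL W H trees) W H) (i + S - 1) (j + T - 1)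
              - get2 (psL (gridL W H trees) W H) (i - 1) (j + T - 1)
              - get2 (psL (gridL W H trees) W H) (i + S - 1) (j - 1)
              + get2 (psL (gridL W H trees) W H) (i - 1) (j - 1)))
        = (PySem.List.pyRange 1 (W - S + 2) 1).map (fun i =>
          (PySem.List.pyRange 1 (H - T + 2) 1).map (fun j =>
            ((PySem.List.pyRange i (i + S) 1).map (fun x =>
              ((PySem.List.pyRange j (j + T) 1).map (fun y =>
                get2 (trees.foldl (fun g p => set2 g p.1 p.2 1) (mk2 W H)) x y)).sum)).sum)) := by
      apply List.map_congr_left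
      intro i hi
      apply List.map_congr_left
      intro j hj
      rw [PySem.List.mem_pyRange_one] at hi hj
      rw [hpget (i + S - 1) (j + T - 1) (by omega) (by omega) (by omega) (by omega),
          hpget (i - 1) (j + T - 1) (by omega) (by omega) (by omega) (by omega),
          hpget (i + S - 1) (j - 1) (by omega) (by omega) (by omega) (by omega),
          hpget (i - 1) (j - 1) (by omega) (by omega) (by omega) (by omega),
          cnt_eq (fun a b => get2 (gridL W H trees) a b) W H S T i j hS hT
            (by omega) (by omega) (by omega) (by omega)]
      rfl
    calc _ = ((PySem.List.pyRange 1 (W - S + 2) 1).map (fun i =>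
              (PySem.List.pyRange 1 (H - T + 2) 1).map (fun j =>
                get2 (psL (gridL W H trees) W H) (i + S - 1) (j + T - 1)
                  - get2 (psL (gridL W H trees) W H) (i - 1) (j + T - 1)
                  - get2 (psL (gridL W H trees) W H) (i + S - 1) (j - 1)
                  + get2 (psL (gridL W H trees) W H) (i - 1) (j - 1)))).flatten := by
            rw [List.flatMap_def]
      _ = _ := by rw [hmaps, ← List.flatMap_def]
  rw [hlists]
  apply fold_max_eq_maxD
  intro c hc
  simp only [List.mem_flatMap, List.mem_map] at hc
  obtain ⟨i, hi, j, hj, rfl⟩ := hc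
  rw [PySem.List.mem_pyRange_one] at hi hj
  exact bandSum_nonneg _ (entries_nonneg_grid W H trees) i j S T (by omega) (by omega)

theorem solve_degenerate (n W H : Int) (trees : List (Int × Int)) (S T : Int)
    (hd : W < S ∨ H < T) : solve n W H trees S T = solve_alt n W H trees S T := by
  unfold solve solve_alt
  rcases hd with h | h
  · rw [show PySem.List.pyRange 1 (W - S + 2) 1 = [] from PySem.List.pyRange_one_eq_nil (by omega)]
    simp only [List.foldl_nil, List.flatMap_nil]
    rw [(PySem.List.max?_eq_none_iff [] (fun c => c)).mpr rfl]
    rfl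
  · rw [show PySem.List.pyRange 1 (H - T + 2) 1 = [] from PySem.List.pyRange_one_eq_nil (by omega)]
    simp only [List.foldl_nil, List.map_nil, PySem.List.foldl_ignore]
    have : (PySem.List.pyRange 1 (W - S + 2) 1).flatMap (fun _ => ([] : List Int)) = [] := by
      simp
    rw [this, (PySem.List.max?_eq_none_iff [] (fun c => c)).mpr rfl]
    rfl

-- ===== VERDICT (by name: the statement is the Claim_ definition above) =====
theorem solve_spec : Claim_equal_solve := by
  intro n W H trees S T _ hpre
  obtain ⟨-, hst⟩ := hpre
  rcases hst with ⟨hS, hT⟩ | hd | hd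
  · exact solve_main n W H trees S T hS hT
  · exact solve_degenerate n W H trees S T (Or.inl hd)
  · exact solve_degenerate n W H trees S T (Or.inr hd)
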